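-- pv_equiv track=rewrite | github.com/georgegiurgea/Compresiestring | PythonApplication2/PythonApplication2.py | lzw_size_in_bits
-- ===== SOURCE A (Python) =====
-- def lzw_size_in_bits(encoded):
--     bit_length = 9
--     dictionary_size = 512
--     bits = 0
--
--     for code in encoded:
--         bits += bit_length
--
--         if code == dictionary_size:
--             bit_length += 1
--             dictionary_size *= 2
--
--     return bits
-- ===== SOURCE B (Python) =====
-- def lzw_size_in_bits(encoded):
--     # Staged threshold searches: the width only bumps at the first occurrence of
--     # 512, then the first occurrence of 1024 after that, and so on; each such
--     # trigger makes every later code one bit wider.  No per-element state machine.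
--     encoded = list(encoded)
--     n = len(encoded)
--     bits = 9 * n
--     threshold = 512
--     start = 0
--     while True:
--         try:
--             i = encoded.index(threshold, start)
--         except ValueError:
--             return bits
--         bits += n - 1 - i
--         threshold *= 2
--         start = i + 1
-- ===== Notes on version B (the rewrite author's own statement) =====
-- stated objective: alternative
-- what changed: B replaces A's per-element state machine (running bit_length accumulated at every code) by staged list.index searches for the successive power-of-two thresholds 512, 1024, ..., adding (n-1-i) bits at each found trigger; correct because the width only changes at the first occurrence of the current dictionary size.
import Mathlib
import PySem

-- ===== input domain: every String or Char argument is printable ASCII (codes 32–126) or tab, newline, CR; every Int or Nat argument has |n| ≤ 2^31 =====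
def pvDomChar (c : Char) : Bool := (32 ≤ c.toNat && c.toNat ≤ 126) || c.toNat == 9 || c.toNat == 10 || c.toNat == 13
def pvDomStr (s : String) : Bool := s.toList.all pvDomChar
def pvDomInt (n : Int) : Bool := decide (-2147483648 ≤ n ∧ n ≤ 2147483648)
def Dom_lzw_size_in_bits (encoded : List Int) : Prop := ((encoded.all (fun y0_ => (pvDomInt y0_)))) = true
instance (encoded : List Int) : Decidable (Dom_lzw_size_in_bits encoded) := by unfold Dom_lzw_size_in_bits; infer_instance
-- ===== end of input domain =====

-- B replaces A's per-element state machine by staged searches for the successive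
-- thresholds 512, 1024, …, charging n-1-i extra bits at each found trigger (alternative decomposition, same O(n)).

-- ===== PORT A =====
-- loop body of A; state = (bit_length, dictionary_size, bits)
def lzwStepA (s : Int × Int × Int) (code : Int) : Int × Int × Int :=
  let bits := s.2.2 + s.1
  if code == s.2.1 then (s.1 + 1, s.2.1 * 2, bits) else (s.1, s.2.1, bits)

def lzw_size_in_bits (encoded : List Int) : Int :=
  (encoded.foldl lzwStepA (9, 512, 0)).2.2

-- ===== PORT B =====
-- encoded.index(v, start): search the suffix; returns the RELATIVE offset of the
-- first match together with the list after it (none = ValueError)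
def lzwFind (xs : List Int) (v : Int) : Option (Nat × List Int) :=
  match xs with
  | [] => none
  | x :: t => if x == v then some (0, t)
              else (lzwFind t v).map (fun p => (p.1 + 1, p.2))

theorem lzwFind_shrinks (xs : List Int) (v : Int) (j : Nat) (rest : List Int)
    (h : lzwFind xs v = some (j, rest)) : rest.length < xs.length := by
  induction xs generalizing j with
  | nil => simp [lzwFind] at h
  | cons x t ih =>
    by_cases hx : x == v
    · simp [lzwFind, hx] at h
      simp [← h.2]
    · rw [lzwFind, if_neg (by simpa using hx), Option.map_eq_some_iff] at h
      obtain ⟨⟨j', r'⟩, hfind, hp⟩ := h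
      have hr : r' = rest := congrArg Prod.snd hp
      subst hr
      exact Nat.lt_trans (ih j' hfind) (by simp)

-- the while-loop of Source B: bits starts at 9*n; each found trigger at absolute
-- index start+j adds n-1-(start+j) and doubles the threshold
def lzwLoop (suffix : List Int) (start n threshold bits : Int) : Int :=
  match h : lzwFind suffix threshold with
  | none => bits
  | some (j, rest) =>
      lzwLoop rest (start + (j : Int) + 1) n (threshold * 2)
        (bits + (n - 1 - (start + (j : Int))))
termination_by suffix.length
decreasing_by exact lzwFind_shrinks _ _ _ _ h

def lzw_size_in_bits_alt (encoded : List Int) : Int :=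
  lzwLoop encoded 0 (encoded.length : Int) 512 (9 * (encoded.length : Int))

-- ===== PRECONDITION & SPEC =====
def Spec_lzw_size_in_bits (encoded : List Int) (out : Int) : Prop := out = lzw_size_in_bits_alt encoded
instance (encoded : List Int) (out : Int) : Decidable (Spec_lzw_size_in_bits encoded out) := by unfold Spec_lzw_size_in_bits; infer_instance

-- ===== CLAIM (what is proved, stated in full; the proofs are below) =====
def Claim_equal_lzw_size_in_bits : Prop := ∀ (encoded : List Int), Dom_lzw_size_in_bits encoded → Spec_lzw_size_in_bits encoded (lzw_size_in_bits encoded)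

-- ===== LEMMAS AND PROOFS =====

-- lzwFind xs v = none ↔ no element of xs equals v
theorem lzwFind_none_iff (xs : List Int) (v : Int) :
    lzwFind xs v = none ↔ ∀ x ∈ xs, x ≠ v := by
  induction xs with
  | nil => simp [lzwFind]
  | cons x t ih =>
    by_cases hx : x = v
    · simp [lzwFind, hx]
    · simp [lzwFind, hx, ih]

-- a successful search decomposes the list: a v-free prefix of length j, then v, then rest
theorem lzwFind_some (xs : List Int) (v : Int) (j : Nat) (rest : List Int)
    (h : lzwFind xs v = some (j, rest)) :
    ∃ pre : List Int, xs = pre ++ v :: rest ∧ pre.length = j ∧ ∀ x ∈ pre, x ≠ v := by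
  induction xs generalizing j with
  | nil => simp [lzwFind] at h
  | cons x t ih =>
    by_cases hx : x = v
    · simp [lzwFind, hx] at h
      exact ⟨[], by simp [hx, h.1, ← h.2]⟩
    · rw [lzwFind, if_neg (by simpa using hx), Option.map_eq_some_iff] at h
      obtain ⟨⟨j', r'⟩, hfind, hp⟩ := h
      have hj : j' + 1 = j := congrArg Prod.fst hp
      have hr : r' = rest := congrArg Prod.snd hp
      subst hr
      obtain ⟨pre, hxs, hlen, hfree⟩ := ih j' hfind
      exact ⟨x :: pre, by simp [hxs], by simp [hlen, ← hj],
        by intro y hy; rcases List.mem_cons.mp hy with h1 | h1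
           · exact h1 ▸ hx
           · exact hfree y h1⟩

-- A's fold over a trigger-free list keeps (b, d) and adds b per element
theorem foldA_nomatch (xs : List Int) (b d a : Int) (h : ∀ x ∈ xs, x ≠ d) :
    xs.foldl lzwStepA (b, d, a) = (b, d, a + b * xs.length) := by
  induction xs generalizing a with
  | nil => simp
  | cons x t ih =>
    have hx : ¬ (x == d) = true := by simpa using h x (List.mem_cons_self)
    rw [List.foldl_cons]
    simp only [lzwStepA, hx, Bool.false_eq_true, if_false]
    rw [ih (a + b) (fun y hy => h y (List.mem_cons_of_mem _ hy))]
    simp only [Prod.mk.injEq, List.length_cons, true_and]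
    push_cast; ring

-- loop invariant tying A's fold to B's staged searches
theorem lzw_agree : ∀ (m : Nat) (xs : List Int), xs.length = m →
    ∀ (b d a s n : Int), n - s = xs.length →
    (xs.foldl lzwStepA (b, d, a)).2.2 = lzwLoop xs s n d (a + b * xs.length) := by
  intro m
  induction m using Nat.strong_induction_on with
  | _ m ih =>
    intro xs hm b d a s n hns
    cases hfind : lzwFind xs d with
    | none =>
      rw [lzwLoop, hfind]
      rw [foldA_nomatch xs b d a ((lzwFind_none_iff xs d).mp hfind)]
    | some p =>
      obtain ⟨j, rest⟩ := p
      obtain ⟨pre, hxs, hlen, hfree⟩ := lzwFind_some xs d j rest hfind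
      rw [lzwLoop, hfind]
      subst hxs
      rw [List.foldl_append, foldA_nomatch pre b d a hfree, List.foldl_cons]
      simp only [lzwStepA, beq_self_eq_true, if_true]
      have hrest : rest.length < m := by
        rw [← hm]; exact lzwFind_shrinks _ _ _ _ hfind
      have hns' : n - (s + (j : Int) + 1) = (rest.length : Int) := by
        simp only [List.length_append, List.length_cons] at hns
        push_cast at hns ⊢; omega
      rw [ih rest.length hrest rest rfl (b + 1) (d * 2)
        (a + b * ↑pre.length + b) (s + (j : Int) + 1) n hns']
      congr 1
      simp only [List.length_append, List.length_cons]
      push_cast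
      linear_combination -hns'

-- ===== VERDICT (by name: the statement is the Claim_ definition above) =====
theorem lzw_size_in_bits_spec : Claim_equal_lzw_size_in_bits := by
  intro encoded _
  unfold Spec_lzw_size_in_bits lzw_size_in_bits lzw_size_in_bits_alt
  simpa using lzw_agree encoded.length encoded rfl 9 512 0 0 encoded.length (by simp)
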